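-- pv_equiv track=rewrite | github.com/sunghan-kim/algorithm-python | programmers/level2/015_방금그곡_03.py | get_me
-- ===== SOURCE A (Python) =====
-- def get_me(melody, du):
--     #me = []
--     melody = melody.replace('C#','c').replace('D#','d').replace('F#','f').replace('G#','g').replace('A#','a')
--     me = list(melody)
--     if du == 0:
--         return me
--     else:
--         res = []
--         for i in range(du):
--             res.append(me[i%len(me)])
--         return res
-- ===== SOURCE B (Python) =====
-- def get_me(melody, du):
--     # one left-to-right scan instead of five chained .replace passes
--     me = []
--     i = 0
--     L = len(melody)
--     while i < L:
--         c = melody[i]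
--         if i + 1 < L and melody[i + 1] == '#' and c in 'CDFGA':
--             me.append(c.lower())
--             i += 2
--         else:
--             me.append(c)
--             i += 1
--     if du == 0:
--         return me
--     if du < 0:
--         return []
--     q, r = divmod(du, len(me))
--     return me * q + me[:r]
-- ===== Notes on version B (the rewrite author's own statement) =====
-- stated objective: alternative
-- what changed: Normalization is a single left-to-right scan (letter followed by '#' becomes its lowercase) instead of five chained str.replace passes, and the length-du result is built by list repetition plus a slice (divmod) instead of an element-by-element modular-index loop.
-- outside the precondition, e.g. on get_me('', 3): A raises ZeroDivisionError, B raises ZeroDivisionError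
import Mathlib
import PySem

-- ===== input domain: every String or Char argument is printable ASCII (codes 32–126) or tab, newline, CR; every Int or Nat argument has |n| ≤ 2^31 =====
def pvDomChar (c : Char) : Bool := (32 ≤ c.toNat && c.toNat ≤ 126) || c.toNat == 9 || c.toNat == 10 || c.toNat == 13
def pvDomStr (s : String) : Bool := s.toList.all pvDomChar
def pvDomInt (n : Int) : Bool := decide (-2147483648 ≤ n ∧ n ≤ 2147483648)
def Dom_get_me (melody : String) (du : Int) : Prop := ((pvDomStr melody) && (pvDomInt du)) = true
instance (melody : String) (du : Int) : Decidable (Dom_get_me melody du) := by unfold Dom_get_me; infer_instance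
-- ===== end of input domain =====

-- B replaces the five chained .replace passes by one left-to-right scan and the
-- modular-index loop by list repetition plus a slice (divmod); same cost, different decomposition.


-- ===== PORT A =====
def get_me (melody : String) (du : Int) : List String :=
  let m := PySem.Str.replace (PySem.Str.replace (PySem.Str.replace (PySem.Str.replace
             (PySem.Str.replace melody "C#" "c") "D#" "d") "F#" "f") "G#" "g") "A#" "a"
  let me := m.toList.map (fun c => String.ofList [c])
  if du = 0 then me
  else
    (PySem.List.pyRange 0 du 1).foldl
      (fun res i => res ++ [PySem.List.pyGetD me (PySem.Int.mod i (me.length : Int)) ""]) []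

-- ===== PORT B =====
-- one-pass scan of Source B: letter in 'CDFGA' followed by '#' → its lowercase, advance 2
def normB : List Char → List String
  | [] => []
  | [c] => [String.ofList [c]]
  | c :: d :: t =>
    if d = '#' ∧ (c = 'C' ∨ c = 'D' ∨ c = 'F' ∨ c = 'G' ∨ c = 'A') then
      PySem.Str.lower (String.ofList [c]) :: normB t
    else
      String.ofList [c] :: normB (d :: t)

def get_me_alt (melody : String) (du : Int) : List String :=
  let me := normB melody.toList
  if du = 0 then me
  else if du < 0 then []
  else
    let q := PySem.Int.floordiv du (me.length : Int)
    let r := PySem.Int.mod du (me.length : Int)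
    (List.replicate q.toNat me).flatten ++ PySem.List.slice me none (some r)

-- ===== PRECONDITION & SPEC =====
-- Pre_ excludes only (melody = "", du > 0), where Python A raises ZeroDivisionError (i % 0).
def Pre_get_me (melody : String) (du : Int) : Prop := 0 < du → melody ≠ ""
instance (melody : String) (du : Int) : Decidable (Pre_get_me melody du) := by
  unfold Pre_get_me; infer_instance
def pvWitness_get_me : String × Int := ("CC#D#xG#", 7)

def Spec_get_me (melody : String) (du : Int) (out : List String) : Prop := out = get_me_alt melody du
instance (melody : String) (du : Int) (out : List String) : Decidable (Spec_get_me melody du out) := by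
  unfold Spec_get_me; infer_instance

-- ===== CLAIM (what is proved, stated in full; the proofs are below) =====
def Claim_equal_get_me : Prop := ∀ (melody : String) (du : Int), Dom_get_me melody du → Pre_get_me melody du → Spec_get_me melody du (get_me melody du)

-- ===== LEMMAS AND PROOFS =====

def repl1 (a b : Char) : List Char → List Char
  | [] => []
  | [c] => [c]
  | c :: d :: t =>
    if c = a ∧ d = '#' then b :: repl1 a b t
    else c :: repl1 a b (d :: t)

theorem replace_go_eq (a b : Char) :
    ∀ (fuel : Nat) (l acc : List Char), l.length ≤ fuel →
      PySem.Chars.replace.go [a, '#'] [b] fuel l acc = acc.reverse ++ repl1 a b l := by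
  intro fuel
  induction fuel with
  | zero =>
    intro l acc h
    have : l = [] := by cases l <;> simp_all
    subst this
    simp [PySem.Chars.replace.go, repl1]
  | succ n ih =>
    intro l acc h
    match l with
    | [] => simp [PySem.Chars.replace.go, repl1]
    | [c] =>
      rw [PySem.Chars.replace.go]
      have hpre : [a, '#'].isPrefixOf [c] = false := by simp [List.isPrefixOf]
      simp only [hpre, Bool.false_eq_true, if_false]
      rw [ih [] (c :: acc) (by simp)]
      simp [repl1]
    | c :: d :: t =>
      rw [PySem.Chars.replace.go]
      by_cases hp : [a, '#'].isPrefixOf (c :: d :: t)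
      · have hp' := hp
        simp [List.isPrefixOf] at hp'
        obtain ⟨h1, h2⟩ := hp'
        rw [if_pos (by simpa using hp)]
        have hd : List.drop [a, '#'].length (c :: d :: t) = t := by simp
        rw [hd, ih t _ (by simp at h ⊢; omega)]
        simp [repl1, ← h1, ← h2]
      · rw [if_neg (by simpa using hp)]
        rw [ih (d :: t) _ (by simp at h ⊢; omega)]
        have hne : ¬ (c = a ∧ d = '#') := by
          intro ⟨x, y⟩; exact hp (by simp [List.isPrefixOf, x, y])
        simp [repl1, hne]

theorem chars_replace_eq (a b : Char) (l : List Char) :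
    PySem.Chars.replace l [a, '#'] [b] = repl1 a b l := by
  rw [PySem.Chars.replace]
  simp [replace_go_eq a b l.length l [] (le_refl _)]

theorem repl1_cons (a b c : Char) (Y : List Char) (h : c ≠ a ∨ Y.head? ≠ some '#') :
    repl1 a b (c :: Y) = c :: repl1 a b Y := by
  match Y with
  | [] => simp [repl1]
  | d :: t =>
    have hne : ¬ (c = a ∧ d = '#') := by
      rintro ⟨x, y⟩
      rcases h with h | h
      · exact h x
      · exact h (by simp [y])
    simp [repl1, hne]

theorem repl1_head (a b hd : Char) (t : List Char) (h1 : hd ≠ '#') (h2 : b ≠ '#') :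
    (repl1 a b (hd :: t)).head? ≠ some '#' := by
  match t with
  | [] => simpa [repl1] using h1
  | d :: t' =>
    by_cases hc : hd = a ∧ d = '#'
    · simp [repl1, hc, h2]
    · simp [repl1, hc, h1]

def chain (l : List Char) : List Char :=
  repl1 'A' 'a' (repl1 'G' 'g' (repl1 'F' 'f' (repl1 'D' 'd' (repl1 'C' 'c' l))))

theorem repl1_head2 (a b : Char) (l : List Char) (h1 : l.head? ≠ some '#') (h2 : b ≠ '#') :
    (repl1 a b l).head? ≠ some '#' := by
  match l with
  | [] => simp [repl1]
  | hd :: t => exact repl1_head a b hd t (by simpa using h1) h2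

theorem chain_cons (c d : Char) (t : List Char)
    (h : ¬ (d = '#' ∧ (c = 'C' ∨ c = 'D' ∨ c = 'F' ∨ c = 'G' ∨ c = 'A'))) :
    chain (c :: d :: t) = c :: chain (d :: t) := by
  unfold chain
  by_cases hd : d = '#'
  · have hc : ¬ (c = 'C' ∨ c = 'D' ∨ c = 'F' ∨ c = 'G' ∨ c = 'A') := fun hx => h ⟨hd, hx⟩
    push Not at hc
    obtain ⟨h1, h2, h3, h4, h5⟩ := hc
    rw [repl1_cons 'C' 'c' c _ (Or.inl h1), repl1_cons 'D' 'd' c _ (Or.inl h2),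
        repl1_cons 'F' 'f' c _ (Or.inl h3), repl1_cons 'G' 'g' c _ (Or.inl h4),
        repl1_cons 'A' 'a' c _ (Or.inl h5)]
  · have k0 : (d :: t).head? ≠ some '#' := by simpa using hd
    have k1 := repl1_head2 'C' 'c' _ k0 (by decide)
    have k2 := repl1_head2 'D' 'd' _ k1 (by decide)
    have k3 := repl1_head2 'F' 'f' _ k2 (by decide)
    have k4 := repl1_head2 'G' 'g' _ k3 (by decide)
    rw [repl1_cons 'C' 'c' c _ (Or.inr k0), repl1_cons 'D' 'd' c _ (Or.inr k1),
        repl1_cons 'F' 'f' c _ (Or.inr k2), repl1_cons 'G' 'g' c _ (Or.inr k3),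
        repl1_cons 'A' 'a' c _ (Or.inr k4)]

theorem chain_eq_normB : ∀ l : List Char, (chain l).map (fun c => String.ofList [c]) = normB l := by
  intro l
  induction l using normB.induct with
  | case1 => simp [chain, repl1, normB]
  | case2 c => simp [chain, repl1, normB]
  | case3 c d t hcond ih =>
    obtain ⟨hd, hc⟩ := hcond
    subst hd
    rw [normB]
    rw [if_pos ⟨rfl, hc⟩]
    rcases hc with h | h | h | h | h <;> subst h
    · have e1 : chain ('C' :: '#' :: t) = 'c' :: chain t := by
        unfold chain
        rw [show ∀ X, repl1 'C' 'c' ('C' :: '#' :: X) = 'c' :: repl1 'C' 'c' X from fun X => by simp [repl1]]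
        rw [repl1_cons 'D' 'd' 'c' _ (Or.inl (by decide))]
        rw [repl1_cons 'F' 'f' 'c' _ (Or.inl (by decide))]
        rw [repl1_cons 'G' 'g' 'c' _ (Or.inl (by decide))]
        rw [repl1_cons 'A' 'a' 'c' _ (Or.inl (by decide))]
      rw [e1, List.map_cons, ih]
      norm_num
      decide
    · have e1 : chain ('D' :: '#' :: t) = 'd' :: chain t := by
        unfold chain
        rw [repl1_cons 'C' 'c' 'D' _ (Or.inl (by decide)), repl1_cons 'C' 'c' '#' _ (Or.inl (by decide))]
        rw [show ∀ X, repl1 'D' 'd' ('D' :: '#' :: X) = 'd' :: repl1 'D' 'd' X from fun X => by simp [repl1]]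
        rw [repl1_cons 'F' 'f' 'd' _ (Or.inl (by decide))]
        rw [repl1_cons 'G' 'g' 'd' _ (Or.inl (by decide))]
        rw [repl1_cons 'A' 'a' 'd' _ (Or.inl (by decide))]
      rw [e1, List.map_cons, ih]
      norm_num
      decide
    · have e1 : chain ('F' :: '#' :: t) = 'f' :: chain t := by
        unfold chain
        rw [repl1_cons 'C' 'c' 'F' _ (Or.inl (by decide)), repl1_cons 'C' 'c' '#' _ (Or.inl (by decide))]
        rw [repl1_cons 'D' 'd' 'F' _ (Or.inl (by decide)), repl1_cons 'D' 'd' '#' _ (Or.inl (by decide))]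
        rw [show ∀ X, repl1 'F' 'f' ('F' :: '#' :: X) = 'f' :: repl1 'F' 'f' X from fun X => by simp [repl1]]
        rw [repl1_cons 'G' 'g' 'f' _ (Or.inl (by decide))]
        rw [repl1_cons 'A' 'a' 'f' _ (Or.inl (by decide))]
      rw [e1, List.map_cons, ih]
      norm_num
      decide
    · have e1 : chain ('G' :: '#' :: t) = 'g' :: chain t := by
        unfold chain
        rw [repl1_cons 'C' 'c' 'G' _ (Or.inl (by decide)), repl1_cons 'C' 'c' '#' _ (Or.inl (by decide))]
        rw [repl1_cons 'D' 'd' 'G' _ (Or.inl (by decide)), repl1_cons 'D' 'd' '#' _ (Or.inl (by decide))]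
        rw [repl1_cons 'F' 'f' 'G' _ (Or.inl (by decide)), repl1_cons 'F' 'f' '#' _ (Or.inl (by decide))]
        rw [show ∀ X, repl1 'G' 'g' ('G' :: '#' :: X) = 'g' :: repl1 'G' 'g' X from fun X => by simp [repl1]]
        rw [repl1_cons 'A' 'a' 'g' _ (Or.inl (by decide))]
      rw [e1, List.map_cons, ih]
      norm_num
      decide
    · have e1 : chain ('A' :: '#' :: t) = 'a' :: chain t := by
        unfold chain
        rw [repl1_cons 'C' 'c' 'A' _ (Or.inl (by decide)), repl1_cons 'C' 'c' '#' _ (Or.inl (by decide))]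
        rw [repl1_cons 'D' 'd' 'A' _ (Or.inl (by decide)), repl1_cons 'D' 'd' '#' _ (Or.inl (by decide))]
        rw [repl1_cons 'F' 'f' 'A' _ (Or.inl (by decide)), repl1_cons 'F' 'f' '#' _ (Or.inl (by decide))]
        rw [repl1_cons 'G' 'g' 'A' _ (Or.inl (by decide)), repl1_cons 'G' 'g' '#' _ (Or.inl (by decide))]
        rw [show ∀ X, repl1 'A' 'a' ('A' :: '#' :: X) = 'a' :: repl1 'A' 'a' X from fun X => by simp [repl1]]
      rw [e1, List.map_cons, ih]
      norm_num
      decide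
  | case4 c d t hcond ih =>
    rw [normB, if_neg hcond, chain_cons c d t hcond, List.map_cons, ih]

theorem cyc (me : List String) (h : me ≠ []) :
    ∀ k : Nat, (List.range k).map (fun i => me.getD (i % me.length) "") =
      (List.replicate (k / me.length) me).flatten ++ me.take (k % me.length) := by
  have hn : 0 < me.length := List.length_pos_iff.2 h
  intro k
  induction k with
  | zero => simp [Nat.zero_div]
  | succ k ih =>
    rw [List.range_succ, List.map_append, ih, List.map_singleton]
    have hr : k % me.length < me.length := Nat.mod_lt _ hn
    have step : me.take (k % me.length) ++ [me.getD (k % me.length) ""] =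
        me.take (k % me.length + 1) := by
      rw [List.take_add_one, List.getElem?_eq_getElem hr, List.getD_eq_getElem me "" hr]
      simp
    rw [List.append_assoc, step]
    have hmod2 : (k + 1) % me.length = (k % me.length + 1) % me.length :=
      (Nat.mod_add_mod k me.length 1).symm
    by_cases hc : k % me.length + 1 = me.length
    · have e := Nat.div_add_mod k me.length
      have hk1 : k + 1 = me.length * (k / me.length + 1) := by
        have h1 : me.length * (k / me.length + 1) = me.length * (k / me.length) + me.length := by
          ring
        have h2 : me.length * (k / me.length) = k / me.length * me.length := Nat.mul_comm _ _
        omega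
      have hdvd : me.length ∣ k + 1 := ⟨_, hk1⟩
      have hdiv : (k + 1) / me.length = k / me.length + 1 := by
        rw [Nat.succ_div, if_pos hdvd]
      have hm0 : (k + 1) % me.length = 0 := by rw [hmod2, hc, Nat.mod_self]
      rw [hdiv, hm0, hc, List.take_length, List.replicate_succ', List.flatten_append]
      simp
    · have hlt : k % me.length + 1 < me.length := by omega
      have hm : (k + 1) % me.length = k % me.length + 1 := by
        rw [hmod2, Nat.mod_eq_of_lt hlt]
      have hndvd : ¬ me.length ∣ k + 1 := by
        intro hd
        have hz : (k + 1) % me.length = 0 := (Nat.mod_eq_zero_of_dvd hd)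
        rw [hmod2, Nat.mod_eq_of_lt hlt] at hz
        omega
      have hdiv : (k + 1) / me.length = k / me.length := by
        rw [Nat.succ_div, if_neg hndvd]; omega
      rw [hdiv, hm]

theorem normB_ne_nil (l : List Char) (h : l ≠ []) : normB l ≠ [] := by
  match l with
  | [c] => simp [normB]
  | c :: d :: t => unfold normB; split <;> simp

theorem meA_eq (melody : String) :
    (PySem.Str.replace (PySem.Str.replace (PySem.Str.replace (PySem.Str.replace
       (PySem.Str.replace melody "C#" "c") "D#" "d") "F#" "f") "G#" "g") "A#" "a").toList.map
         (fun c => String.ofList [c]) = normB melody.toList := by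
  simp only [PySem.Str.toList_replace,
    show ("C#" : String).toList = ['C', '#'] from by decide,
    show ("D#" : String).toList = ['D', '#'] from by decide,
    show ("F#" : String).toList = ['F', '#'] from by decide,
    show ("G#" : String).toList = ['G', '#'] from by decide,
    show ("A#" : String).toList = ['A', '#'] from by decide,
    show ("c" : String).toList = ['c'] from by decide,
    show ("d" : String).toList = ['d'] from by decide,
    show ("f" : String).toList = ['f'] from by decide,
    show ("g" : String).toList = ['g'] from by decide,
    show ("a" : String).toList = ['a'] from by decide,
    chars_replace_eq]
  simpa [chain] using chain_eq_normB melody.toList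

-- ===== VERDICT (by name: the statement is the Claim_ definition above) =====
theorem get_me_spec : Claim_equal_get_me := by
  intro melody du hdom hpre
  unfold Spec_get_me
  simp only [get_me, get_me_alt]
  rw [meA_eq melody]
  by_cases h0 : du = 0
  · simp [h0]
  · rw [if_neg h0, if_neg h0]
    by_cases hneg : du < 0
    · rw [if_pos hneg]
      have hr : PySem.List.pyRange 0 du 1 = [] := by
        simp [PySem.List.pyRange]; omega
      rw [hr]
      simp
    · rw [if_neg hneg]
      have hpos : 0 < du := by omega
      obtain ⟨k, hk⟩ : ∃ k : Nat, du = (k : Int) :=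
        ⟨du.toNat, (Int.toNat_of_nonneg (by omega)).symm⟩
      subst hk
      have hmene : normB melody.toList ≠ [] :=
        normB_ne_nil _ (by simpa using hpre hpos)
      rw [PySem.List.foldl_append_singleton_eq_map, PySem.List.pyRange_zero_natCast k,
        List.map_map, List.nil_append]
      rw [PySem.Int.floordiv_natCast k (normB melody.toList).length,
        PySem.Int.mod_natCast k (normB melody.toList).length, Int.toNat_natCast,
        PySem.List.slice_to _ (by positivity), Int.toNat_natCast]
      rw [← cyc (normB melody.toList) hmene k]
      refine List.map_congr_left ?_
      intro i _
      simp only [Function.comp]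
      rw [PySem.Int.mod_natCast, PySem.List.pyGetD_natCast]
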